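-- pv_equiv track=rewrite | github.com/sutriptaroywork/python-project | gfg-dsa-sheet/day1/uncommon-characters.py | find_uncommon
-- ===== SOURCE A (Python) =====
-- def find_uncommon(str1, str2):
--     char_list = ""
--     freq1 = {}
--     freq2 = {}
--
--     for i in range(26):
--         freq1[i] = False
--         freq2[i] = False
--
--
--     str1_char_list = list(str1)
--     str2_char_list = list(str2)
--
--     for i in str1_char_list:
--         freq1[ord(i) - ord('a')] = True
--
--     for i in str2_char_list:
--         freq2[ord(i) - ord('a')] = True
--
--
--     for i in range(26):
--         if freq1[i] ^ freq2[i]: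
--             char_list += chr(ord('a') + i)
--
--     if char_list == "":
--         return -1
--
--     return char_list
-- ===== SOURCE B (Python) =====
-- def find_uncommon(str1, str2):
--     a = sorted({c for c in str1 if 'a' <= c <= 'z'})
--     b = sorted({c for c in str2 if 'a' <= c <= 'z'})
--     out = []
--     i = j = 0
--     while i < len(a) and j < len(b):
--         if a[i] == b[j]:
--             i += 1
--             j += 1
--         elif a[i] < b[j]:
--             out.append(a[i])
--             i += 1
--         else:
--             out.append(b[j])
--             j += 1
--     out.extend(a[i:])
--     out.extend(b[j:])
--     return ''.join(out) if out else -1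
-- ===== Notes on version B (the rewrite author's own statement) =====
-- stated objective: alternative
-- what changed: Replaces the two fixed 26-entry boolean tables and the 0..25 emit loop by a two-pointer merge of the two sorted distinct-letter lists, emitting letters present in exactly one list during the merge.
-- outside the precondition, e.g. on find_uncommon('ab', 'ba'): A returns -1, B returns -1
import Mathlib
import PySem

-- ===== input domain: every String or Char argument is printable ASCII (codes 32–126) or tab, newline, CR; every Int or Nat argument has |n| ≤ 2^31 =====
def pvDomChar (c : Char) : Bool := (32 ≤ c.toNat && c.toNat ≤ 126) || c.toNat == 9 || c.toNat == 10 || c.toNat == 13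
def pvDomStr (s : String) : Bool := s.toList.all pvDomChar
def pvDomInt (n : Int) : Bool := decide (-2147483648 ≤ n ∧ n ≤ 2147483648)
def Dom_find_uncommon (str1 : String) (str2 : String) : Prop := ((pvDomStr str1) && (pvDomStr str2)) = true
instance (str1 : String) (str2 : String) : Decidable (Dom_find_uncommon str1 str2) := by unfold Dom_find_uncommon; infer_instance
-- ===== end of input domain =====

-- B replaces A's two fixed 26-entry boolean tables and 0..25 emit loop by a two-pointer
-- merge of the two sorted distinct-letter lists (objective: alternative algorithm).

-- ===== PORT A =====
def find_uncommon (str1 : String) (str2 : String) : String :=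
  let freq1 : PySem.Dict Int Bool :=
    (PySem.List.pyRange 0 26 1).foldl (fun d i => d.insert i false) PySem.Dict.empty
  let freq2 : PySem.Dict Int Bool :=
    (PySem.List.pyRange 0 26 1).foldl (fun d i => d.insert i false) PySem.Dict.empty
  let freq1 := str1.toList.foldl (fun d c => d.insert ((c.toNat : Int) - 97) true) freq1
  let freq2 := str2.toList.foldl (fun d c => d.insert ((c.toNat : Int) - 97) true) freq2
  let char_list : List Char :=
    (PySem.List.pyRange 0 26 1).foldl (fun s i =>
      if xor (freq1.getD i false) (freq2.getD i false)
      then s ++ [Char.ofNat (97 + i).toNat] else s) []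
  -- Python returns the int -1 when char_list is empty; that non-string return is excluded by Pre_.
  String.ofList char_list

-- ===== PORT B =====
-- B's while-loop with two indices, transcribed as the obvious structural recursion on the
-- two sorted lists; the trailing out.extend(a[i:]) / out.extend(b[j:]) are the base cases.
def pvMerge : List Char → List Char → List Char
  | [], ys => ys
  | x :: xs, [] => x :: xs
  | x :: xs, y :: ys =>
      if x = y then pvMerge xs ys
      else if x < y then x :: pvMerge xs (y :: ys)
      else y :: pvMerge (x :: xs) ys
termination_by xs ys => xs.length + ys.length

def find_uncommon_alt (str1 : String) (str2 : String) : String :=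
  let a := PySem.List.sorted
    (PySem.Set.ofList (str1.toList.filter (fun c => decide ('a' ≤ c) && decide (c ≤ 'z'))))
    (fun c => c) false
  let b := PySem.List.sorted
    (PySem.Set.ofList (str2.toList.filter (fun c => decide ('a' ≤ c) && decide (c ≤ 'z'))))
    (fun c => c) false
  let out := pvMerge a b
  -- Python returns the int -1 when out is empty; that non-string return is excluded by Pre_.
  if out = [] then "" else String.ofList out

-- ===== PRECONDITION & SPEC =====
-- Pre_ excludes exactly the inputs whose lowercase symmetric difference is empty,
-- on which the Python A (and B) return the int -1 instead of a string.
def Pre_find_uncommon (str1 : String) (str2 : String) : Prop :=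
  ((str1.toList ++ str2.toList).any (fun c =>
      decide ('a' ≤ c) && decide (c ≤ 'z')
        && (str1.toList.contains c != str2.toList.contains c))) = true
instance (str1 : String) (str2 : String) : Decidable (Pre_find_uncommon str1 str2) := by
  unfold Pre_find_uncommon; infer_instance
def pvWitness_find_uncommon : String × String := ("abc", "bd")

def Spec_find_uncommon (str1 : String) (str2 : String) (out : String) : Prop := out = find_uncommon_alt str1 str2
instance (str1 : String) (str2 : String) (out : String) : Decidable (Spec_find_uncommon str1 str2 out) := by unfold Spec_find_uncommon; infer_instance

-- ===== CLAIM (what is proved, stated in full; the proofs are below) =====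
def Claim_equal_find_uncommon : Prop := ∀ (str1 : String) (str2 : String), Dom_find_uncommon str1 str2 → Pre_find_uncommon str1 str2 → Spec_find_uncommon str1 str2 (find_uncommon str1 str2)

-- ===== LEMMAS AND PROOFS =====

-- letters of the range 0..25 passing a predicate, in increasing order
def pvRangeLetters (p : Nat → Bool) : List Char :=
  ((List.range 26).filter p).map (fun i => Char.ofNat (97 + i))

-- the canonical answer: lowercase letters, in increasing order, occurring in exactly one string
def pvCanon (s1 s2 : List Char) : List Char :=
  pvRangeLetters (fun i => s1.contains (Char.ofNat (97 + i)) != s2.contains (Char.ofNat (97 + i)))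

-- lowercase letters of one string, in increasing order
def pvLetters (s : List Char) : List Char :=
  pvRangeLetters (fun i => s.contains (Char.ofNat (97 + i)))

theorem pvChar_toNat (i : Nat) (hi : i < 26) : (Char.ofNat (97 + i)).toNat = 97 + i := by
  rw [Char.toNat_ofNat]
  have : (97 + i).isValidChar := Or.inl (by omega)
  simp [this]

theorem pvChar_eq_iff (c : Char) (i : Nat) (hi : i < 26) :
    c = Char.ofNat (97 + i) ↔ c.toNat = 97 + i := by
  constructor
  · intro h; rw [h, pvChar_toNat i hi]
  · intro h
    refine Char.ext (UInt32.toNat_inj.mp ?_)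
    show c.toNat = (Char.ofNat (97 + i)).toNat
    rw [pvChar_toNat i hi]; exact h

theorem pvLower_iff (c : Char) :
    (decide ('a' ≤ c) && decide (c ≤ 'z')) = true ↔ 97 ≤ c.toNat ∧ c.toNat ≤ 122 := by
  simp [Char.le_def, UInt32.le_iff_toNat_le]

theorem pvContains_ne (l1 l2 : List Char) (c : Char) :
    (l1.contains c ≠ l2.contains c) ↔ ¬ ((c ∈ l1) ↔ (c ∈ l2)) := by
  rw [ne_eq, ← Bool.coe_iff_coe]
  simp

theorem pvDict_mark (l : List Char) (d : PySem.Dict Int Bool) (i : Int) :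
    (l.foldl (fun d c => d.insert ((c.toNat : Int) - 97) true) d).getD i false
      = (d.getD i false || l.any (fun c => ((c.toNat : Int) - 97) == i)) := by
  induction l generalizing d with
  | nil => simp
  | cons c cs ih =>
      simp only [List.foldl_cons, List.any_cons, ih]
      by_cases h : i = (c.toNat : Int) - 97
      · simp [h, PySem.Dict.getD_insert_self]
      · rw [PySem.Dict.getD_insert_of_ne _ _ _ h]
        have : (((c.toNat : Int) - 97) == i) = false := by
          rw [beq_eq_false_iff_ne]; omega
        simp [this]

theorem pvDict_init (l : List Int) (d : PySem.Dict Int Bool) (i : Int)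
    (h : d.getD i false = false) :
    (l.foldl (fun d j => d.insert j false) d).getD i false = false := by
  induction l generalizing d with
  | nil => exact h
  | cons j js ih =>
      refine ih _ ?_
      by_cases hj : i = j
      · simp [hj, PySem.Dict.getD_insert_self]
      · rw [PySem.Dict.getD_insert_of_ne _ _ _ hj]; exact h

theorem pvMark_eq_contains (l : List Char) (i : Nat) (hi : i < 26) :
    (l.any (fun c => ((c.toNat : Int) - 97) == (i : Int)))
      = l.contains (Char.ofNat (97 + i)) := by
  rw [List.contains_eq_any_beq]
  refine PySem.List.any_congr_mem (fun c _ => ?_)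
  by_cases h : c = Char.ofNat (97 + i)
  · subst h
    have h2 : ((Char.ofNat (97 + i)).toNat : Int) - 97 = (i : Int) := by
      rw [pvChar_toNat i hi]; push_cast; ring
    simp [h2]
  · have h1 : (((c.toNat : Int) - 97) == (i : Int)) = false := by
      rw [beq_eq_false_iff_ne]
      intro he
      exact h ((pvChar_eq_iff c i hi).mpr (by omega))
    have h2 : (Char.ofNat (97 + i) == c) = false := by
      rw [beq_eq_false_iff_ne]; exact fun he => h he.symm
    rw [h1, h2]

theorem pvEmit (g : Int → Bool) :
    (PySem.List.pyRange 0 26 1).foldl (fun s i =>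
        if g i then s ++ [Char.ofNat (97 + i).toNat] else s) []
      = ((List.range 26).filter (fun n : Nat => g ((n : Nat) : Int))).map (fun n : Nat => Char.ofNat (97 + n)) := by
  rw [show PySem.List.pyRange 0 26 1 = (List.range 26).map (fun n : Nat => ((n : Nat) : Int)) from by decide]
  rw [List.foldl_map]
  rw [PySem.List.foldl_append_if (p := fun n : Nat => g ((n : Nat) : Int))
      (f := fun n : Nat => Char.ofNat (97 + ((n : Nat) : Int)).toNat)]
  rw [List.nil_append]
  refine List.map_congr_left (fun n hn => ?_)
  congr 1

-- A computes the canonical answer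
theorem pvA_eq_canon (str1 str2 : String) :
    find_uncommon str1 str2 = String.ofList (pvCanon str1.toList str2.toList) := by
  unfold find_uncommon
  dsimp only
  rw [pvEmit]
  unfold pvCanon pvRangeLetters
  congr 1
  refine congrArg _ (List.filter_congr (fun i hi => ?_))
  have hi26 : i < 26 := List.mem_range.mp hi
  rw [pvDict_mark, pvDict_mark, pvDict_init _ _ _ (PySem.Dict.getD_empty _ _)]
  simp only [Bool.false_or]
  rw [pvMark_eq_contains str1.toList i hi26, pvMark_eq_contains str2.toList i hi26]

theorem pvMem_rangeLetters (p : Nat → Bool) (c : Char) :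
    c ∈ pvRangeLetters p ↔ 97 ≤ c.toNat ∧ c.toNat ≤ 122 ∧ p (c.toNat - 97) = true := by
  unfold pvRangeLetters
  simp only [List.mem_map, List.mem_filter, List.mem_range]
  constructor
  · rintro ⟨i, ⟨hi26, hp⟩, rfl⟩
    rw [pvChar_toNat i hi26]
    exact ⟨by omega, by omega, by simpa using hp⟩
  · rintro ⟨h1, h2, hp⟩
    exact ⟨c.toNat - 97, ⟨by omega, hp⟩,
      ((pvChar_eq_iff c (c.toNat - 97) (by omega)).mpr (by omega)).symm⟩

theorem pvRangeLetters_pairwise (p : Nat → Bool) : (pvRangeLetters p).Pairwise (· < ·) := by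
  unfold pvRangeLetters
  rw [List.pairwise_map]
  refine (List.pairwise_lt_range.filter _).imp_of_mem ?_
  intro a b ha hb hab
  have ha26 : a < 26 := List.mem_range.mp (List.mem_of_mem_filter ha)
  have hb26 : b < 26 := List.mem_range.mp (List.mem_of_mem_filter hb)
  rw [Char.lt_def, UInt32.lt_iff_toNat_lt,
    show (Char.ofNat (97 + a)).val.toNat = (Char.ofNat (97 + a)).toNat from rfl,
    show (Char.ofNat (97 + b)).val.toNat = (Char.ofNat (97 + b)).toNat from rfl,
    pvChar_toNat a ha26, pvChar_toNat b hb26]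
  omega

theorem pvLetters_pairwise (s : List Char) : (pvLetters s).Pairwise (· < ·) :=
  pvRangeLetters_pairwise _

theorem pvCanon_pairwise (s1 s2 : List Char) : (pvCanon s1 s2).Pairwise (· < ·) :=
  pvRangeLetters_pairwise _

theorem pvMem_canon (s1 s2 : List Char) (c : Char) :
    c ∈ pvCanon s1 s2 ↔
      (97 ≤ c.toNat ∧ c.toNat ≤ 122 ∧ ¬ ((c ∈ s1) ↔ (c ∈ s2))) := by
  unfold pvCanon
  rw [pvMem_rangeLetters]
  constructor
  · rintro ⟨h1, h2, hp⟩
    have hc : Char.ofNat (97 + (c.toNat - 97)) = c :=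
      ((pvChar_eq_iff c (c.toNat - 97) (by omega)).mpr (by omega)).symm
    rw [hc, bne_iff_ne] at hp
    exact ⟨h1, h2, (pvContains_ne s1 s2 c).mp hp⟩
  · rintro ⟨h1, h2, hne⟩
    have hc : Char.ofNat (97 + (c.toNat - 97)) = c :=
      ((pvChar_eq_iff c (c.toNat - 97) (by omega)).mpr (by omega)).symm
    refine ⟨h1, h2, ?_⟩
    rw [hc, bne_iff_ne]
    exact (pvContains_ne s1 s2 c).mpr hne

theorem pvMem_letters (s : List Char) (c : Char) :
    c ∈ pvLetters s ↔ (97 ≤ c.toNat ∧ c.toNat ≤ 122 ∧ c ∈ s) := by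
  unfold pvLetters
  rw [pvMem_rangeLetters]
  constructor
  · rintro ⟨h1, h2, hp⟩
    have hc : Char.ofNat (97 + (c.toNat - 97)) = c :=
      ((pvChar_eq_iff c (c.toNat - 97) (by omega)).mpr (by omega)).symm
    rw [hc, List.contains_iff_mem] at hp
    exact ⟨h1, h2, hp⟩
  · rintro ⟨h1, h2, hm⟩
    have hc : Char.ofNat (97 + (c.toNat - 97)) = c :=
      ((pvChar_eq_iff c (c.toNat - 97) (by omega)).mpr (by omega)).symm
    refine ⟨h1, h2, ?_⟩
    rw [hc, List.contains_iff_mem]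
    exact hm

-- B's sorted distinct-letter list is pvLetters
theorem pvSortedSet_eq (s : List Char) :
    PySem.List.sorted
        (PySem.Set.ofList (s.filter (fun c => decide ('a' ≤ c) && decide (c ≤ 'z'))))
        (fun c => c) false = pvLetters s := by
  refine PySem.List.sorted_eq_of_perm_of_pairwise_lt _ _ _ ?_ ?_
  · rw [List.perm_ext_iff_of_nodup
        (((pvLetters_pairwise s).imp ne_of_lt : (pvLetters s).Nodup))
        (PySem.Set.nodup_ofList _)]
    intro c
    rw [pvMem_letters, PySem.Set.mem_ofList, List.mem_filter, pvLower_iff]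
    tauto
  · exact pvRangeLetters_pairwise _

-- merge only produces elements of its inputs
theorem pvMerge_subset (xs ys : List Char) (c : Char) (h : c ∈ pvMerge xs ys) :
    c ∈ xs ∨ c ∈ ys := by
  induction xs, ys using pvMerge.induct with
  | case1 ys => rw [pvMerge] at h; exact Or.inr h
  | case2 x xs => rw [pvMerge] at h; exact Or.inl h
  | case3 xs y ys ih =>
      rw [pvMerge, if_pos rfl] at h
      rcases ih h with h' | h'
      · exact Or.inl (List.mem_cons_of_mem _ h')
      · exact Or.inr (List.mem_cons_of_mem _ h')
  | case4 x xs y ys hxy hlt ih =>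
      rw [pvMerge, if_neg hxy, if_pos hlt] at h
      rcases List.mem_cons.mp h with rfl | h'
      · exact Or.inl List.mem_cons_self
      · rcases ih h' with h'' | h''
        · exact Or.inl (List.mem_cons_of_mem _ h'')
        · exact Or.inr h''
  | case5 x xs y ys hxy hlt ih =>
      rw [pvMerge, if_neg hxy, if_neg hlt] at h
      rcases List.mem_cons.mp h with rfl | h'
      · exact Or.inr List.mem_cons_self
      · rcases ih h' with h'' | h''
        · exact Or.inl h''
        · exact Or.inr (List.mem_cons_of_mem _ h'')

theorem pvMerge_pairwise (xs ys : List Char)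
    (hxs : xs.Pairwise (· < ·)) (hys : ys.Pairwise (· < ·)) :
    (pvMerge xs ys).Pairwise (· < ·) := by
  induction xs, ys using pvMerge.induct with
  | case1 ys => rw [pvMerge]; exact hys
  | case2 x xs => rw [pvMerge]; exact hxs
  | case3 xs y ys ih =>
      rw [pvMerge, if_pos rfl]
      exact ih (List.Pairwise.of_cons hxs) (List.Pairwise.of_cons hys)
  | case4 x xs y ys hxy hlt ih =>
      rw [pvMerge, if_neg hxy, if_pos hlt]
      refine List.pairwise_cons.mpr ⟨?_, ih (List.Pairwise.of_cons hxs) hys⟩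
      intro c hc
      rcases pvMerge_subset _ _ _ hc with h' | h'
      · exact (List.pairwise_cons.mp hxs).1 c h'
      · rcases List.mem_cons.mp h' with rfl | h''
        · exact hlt
        · exact lt_trans hlt ((List.pairwise_cons.mp hys).1 c h'')
  | case5 x xs y ys hxy hlt ih =>
      rw [pvMerge, if_neg hxy, if_neg hlt]
      have hyx : y < x := lt_of_le_of_ne (not_lt.mp hlt) (fun h => hxy h.symm)
      refine List.pairwise_cons.mpr ⟨?_, ih hxs (List.Pairwise.of_cons hys)⟩
      intro c hc
      rcases pvMerge_subset _ _ _ hc with h' | h'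
      · rcases List.mem_cons.mp h' with rfl | h''
        · exact hyx
        · exact lt_trans hyx ((List.pairwise_cons.mp hxs).1 c h'')
      · exact (List.pairwise_cons.mp hys).1 c h'

theorem pvMerge_mem (xs ys : List Char)
    (hxs : xs.Pairwise (· < ·)) (hys : ys.Pairwise (· < ·)) (c : Char) :
    c ∈ pvMerge xs ys ↔ ¬ ((c ∈ xs) ↔ (c ∈ ys)) := by
  induction xs, ys using pvMerge.induct with
  | case1 ys =>
      rw [pvMerge]
      simp only [List.not_mem_nil]
      tauto
  | case2 x xs =>
      rw [pvMerge]
      simp only [List.not_mem_nil, List.mem_cons]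
      tauto
  | case3 xs y ys ih =>
      rw [pvMerge, if_pos rfl,
        ih (List.Pairwise.of_cons hxs) (List.Pairwise.of_cons hys)]
      have hx1 : ¬ y ∈ xs := fun h => lt_irrefl y ((List.pairwise_cons.mp hxs).1 y h)
      have hx2 : ¬ y ∈ ys := fun h => lt_irrefl y ((List.pairwise_cons.mp hys).1 y h)
      simp only [List.mem_cons]
      by_cases hcy : c = y
      · subst hcy; tauto
      · tauto
  | case4 x xs y ys hxy hlt ih =>
      rw [pvMerge, if_neg hxy, if_pos hlt, List.mem_cons,
        ih (List.Pairwise.of_cons hxs) hys]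
      have hx1 : ¬ x ∈ xs := fun h => lt_irrefl x ((List.pairwise_cons.mp hxs).1 x h)
      have hx2 : ¬ x ∈ y :: ys := by
        intro h
        rcases List.mem_cons.mp h with rfl | h'
        · exact hxy rfl
        · exact lt_irrefl x (lt_trans hlt ((List.pairwise_cons.mp hys).1 x h'))
      simp only [List.mem_cons] at hx2 ⊢
      by_cases hcx : c = x
      · subst hcx; tauto
      · tauto
  | case5 x xs y ys hxy hlt ih =>
      have hyx : y < x := lt_of_le_of_ne (not_lt.mp hlt) (fun h => hxy h.symm)
      rw [pvMerge, if_neg hxy, if_neg hlt, List.mem_cons,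
        ih hxs (List.Pairwise.of_cons hys)]
      have hy1 : ¬ y ∈ ys := fun h => lt_irrefl y ((List.pairwise_cons.mp hys).1 y h)
      have hy2 : ¬ y ∈ x :: xs := by
        intro h
        rcases List.mem_cons.mp h with rfl | h'
        · exact hxy rfl
        · exact lt_irrefl y (lt_trans hyx ((List.pairwise_cons.mp hxs).1 y h'))
      simp only [List.mem_cons] at hy2 ⊢
      by_cases hcy : c = y
      · subst hcy; tauto
      · tauto

-- two strictly increasing lists with the same members are equal
theorem pvStrictSorted_eq : ∀ (l1 l2 : List Char),
    l1.Pairwise (· < ·) → l2.Pairwise (· < ·) → (∀ c, c ∈ l1 ↔ c ∈ l2) → l1 = l2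
  | [], [], _, _, _ => rfl
  | [], b :: l2, _, _, hm => absurd ((hm b).mpr List.mem_cons_self) (List.not_mem_nil)
  | a :: l1, [], _, _, hm => absurd ((hm a).mp List.mem_cons_self) (List.not_mem_nil)
  | a :: l1, b :: l2, h1, h2, hm => by
      have hab : a = b := by
        rcases List.mem_cons.mp ((hm a).mp List.mem_cons_self) with h | h
        · exact h
        · rcases List.mem_cons.mp ((hm b).mpr List.mem_cons_self) with h' | h'
          · exact h'.symm
          · exact absurd (lt_trans ((List.pairwise_cons.mp h1).1 b h')
              ((List.pairwise_cons.mp h2).1 a h)) (lt_irrefl a)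
      subst hab
      have ha1 : a ∉ l1 := fun h => lt_irrefl a ((List.pairwise_cons.mp h1).1 a h)
      have ha2 : a ∉ l2 := fun h => lt_irrefl a ((List.pairwise_cons.mp h2).1 a h)
      have : l1 = l2 := by
        refine pvStrictSorted_eq l1 l2 (List.Pairwise.of_cons h1) (List.Pairwise.of_cons h2)
          (fun c => ?_)
        constructor
        · intro hc
          rcases List.mem_cons.mp ((hm c).mp (List.mem_cons_of_mem _ hc)) with rfl | h
          · exact absurd hc ha1
          · exact h
        · intro hc
          rcases List.mem_cons.mp ((hm c).mpr (List.mem_cons_of_mem _ hc)) with rfl | h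
          · exact absurd hc ha2
          · exact h
      rw [this]

theorem pvMerge_letters (s1 s2 : List Char) :
    pvMerge (pvLetters s1) (pvLetters s2) = pvCanon s1 s2 := by
  refine pvStrictSorted_eq _ _
    (pvMerge_pairwise _ _ (pvLetters_pairwise s1) (pvLetters_pairwise s2))
    (pvCanon_pairwise s1 s2) (fun c => ?_)
  rw [pvMerge_mem (pvLetters s1) (pvLetters s2) (pvLetters_pairwise s1) (pvLetters_pairwise s2) c,
    pvMem_letters, pvMem_letters, pvMem_canon]
  by_cases h1 : 97 ≤ c.toNat
  · by_cases h2 : c.toNat ≤ 122 <;> tauto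
  · tauto

theorem pvB_eq_canon (str1 str2 : String) (hpre : Pre_find_uncommon str1 str2) :
    find_uncommon_alt str1 str2 = String.ofList (pvCanon str1.toList str2.toList) := by
  unfold find_uncommon_alt
  dsimp only
  rw [pvSortedSet_eq, pvSortedSet_eq, pvMerge_letters]
  have hne : pvCanon str1.toList str2.toList ≠ [] := by
    unfold Pre_find_uncommon at hpre
    rw [List.any_eq_true] at hpre
    obtain ⟨c, _, hc⟩ := hpre
    rw [Bool.and_eq_true, Bool.and_eq_true] at hc
    have hb : 97 ≤ c.toNat ∧ c.toNat ≤ 122 :=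
      (pvLower_iff c).mp (by rw [Bool.and_eq_true]; exact hc.1)
    have hne : ¬ ((c ∈ str1.toList) ↔ (c ∈ str2.toList)) :=
      (pvContains_ne _ _ c).mp (bne_iff_ne.mp hc.2)
    intro hempty
    have : c ∈ pvCanon str1.toList str2.toList := by
      rw [pvMem_canon]
      exact ⟨hb.1, hb.2, hne⟩
    rw [hempty] at this
    exact List.not_mem_nil this
  rw [if_neg hne]

-- ===== VERDICT (by name: the statement is the Claim_ definition above) =====
theorem find_uncommon_spec : Claim_equal_find_uncommon := by
  intro str1 str2 _ hpre
  unfold Spec_find_uncommon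
  rw [pvA_eq_canon, pvB_eq_canon str1 str2 hpre]
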